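-- pv_equiv track=rewrite | github.com/meganenglert/research | research.py | generate_cycle
-- ===== SOURCE A (Python) =====
-- def generate_cycle(size:int) -> [[int]]:
--     arr = []
--     for i in range(size):
--         row = []
--         for j in range(size):
--             if abs(i-j) == 1 or abs(i-j) == size - 1:
--                 row.append(1)
--             else:
--                 row.append(0)
--         arr.append(row)
--     return arr
-- ===== SOURCE B (Python) =====
-- def generate_cycle(size: int) -> [[int]]:
--     arr = [[0] * size for _ in range(size)]
--     for i in range(size):
--         arr[i][(i + 1) % size] = 1
--         arr[i][(i - 1) % size] = 1
--     return arr
-- ===== Notes on version B (the rewrite author's own statement) =====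
-- stated objective: simpler
-- what changed: B allocates an all-zeros size x size matrix and writes only the two cycle-edge entries per row via modular indexing, instead of testing a distance condition on every cell.
import Mathlib
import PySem

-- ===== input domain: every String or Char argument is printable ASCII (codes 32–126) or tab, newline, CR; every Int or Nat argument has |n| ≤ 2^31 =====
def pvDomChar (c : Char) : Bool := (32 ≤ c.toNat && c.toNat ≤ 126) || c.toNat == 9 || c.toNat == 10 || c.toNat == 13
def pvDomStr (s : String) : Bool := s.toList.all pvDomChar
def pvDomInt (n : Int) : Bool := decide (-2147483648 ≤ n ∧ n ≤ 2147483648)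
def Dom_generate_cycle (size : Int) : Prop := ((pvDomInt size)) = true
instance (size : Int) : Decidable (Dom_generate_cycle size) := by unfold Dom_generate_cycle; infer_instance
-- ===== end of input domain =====

-- B builds an all-zeros matrix and writes only the two cycle-edge entries of each row (modular indexing), instead of testing a distance condition on every cell; equivalence is proved for every Int size.


-- ===== PORT A =====
def generate_cycle (size : Int) : List (List Int) :=
  (PySem.List.pyRange 0 size).foldl (fun arr i =>
    arr ++ [(PySem.List.pyRange 0 size).foldl (fun row j =>
      row ++ [if |i - j| = 1 ∨ |i - j| = size - 1 then (1 : Int) else 0]) []]) []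

-- ===== PORT B =====
-- '[0] * size' is List.replicate size.toNat 0 (Python's list repetition clamps a negative count to empty, as toNat does);
-- each 'arr[i][k] = 1' is a pySetD of the row fetched with pyGetD (indices are always in range here).
def generate_cycle_alt (size : Int) : List (List Int) :=
  let arr := (PySem.List.pyRange 0 size).map (fun _ => List.replicate size.toNat (0 : Int))
  (PySem.List.pyRange 0 size).foldl (fun arr i =>
    let arr := PySem.List.pySetD arr i
      (PySem.List.pySetD (PySem.List.pyGetD arr i []) (PySem.Int.mod (i + 1) size) 1)
    PySem.List.pySetD arr i
      (PySem.List.pySetD (PySem.List.pyGetD arr i []) (PySem.Int.mod (i - 1) size) 1)) arr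

-- ===== PRECONDITION & SPEC =====
def Spec_generate_cycle (size : Int) (out : List (List Int)) : Prop := out = generate_cycle_alt size
instance (size : Int) (out : List (List Int)) : Decidable (Spec_generate_cycle size out) := by unfold Spec_generate_cycle; infer_instance

-- ===== CLAIM (what is proved, stated in full; the proofs are below) =====
def Claim_equal_generate_cycle : Prop := ∀ (size : Int), Dom_generate_cycle size → Spec_generate_cycle size (generate_cycle size)

-- ===== LEMMAS AND PROOFS =====

-- B's per-row write: set the two neighbour columns of row i to 1
def rowB (size : Int) (r : List Int) (i : Int) : List Int :=
  PySem.List.pySetD (PySem.List.pySetD r (PySem.Int.mod (i + 1) size) 1) (PySem.Int.mod (i - 1) size) 1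

-- B's loop body, named for the proofs
def bstep (size : Int) (arr : List (List Int)) (i : Int) : List (List Int) :=
  let arr := PySem.List.pySetD arr i
    (PySem.List.pySetD (PySem.List.pyGetD arr i []) (PySem.Int.mod (i + 1) size) 1)
  PySem.List.pySetD arr i
    (PySem.List.pySetD (PySem.List.pyGetD arr i []) (PySem.Int.mod (i - 1) size) 1)

theorem alt_eq_foldl (size : Int) :
    generate_cycle_alt size =
      (PySem.List.pyRange 0 size).foldl (bstep size)
        ((PySem.List.pyRange 0 size).map (fun _ => List.replicate size.toNat (0 : Int))) := rfl

theorem pyRange_nonpos (s : Int) (h : s ≤ 0) : PySem.List.pyRange 0 s = [] := by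
  simp only [PySem.List.pyRange, one_ne_zero, ↓reduceIte, one_mul, zero_add, zero_lt_one, sub_zero,
    add_sub_cancel_right, EuclideanDomain.div_one, List.map_eq_nil_iff, List.range_eq_nil, ite_eq_right_iff,
    Int.toNat_eq_zero, h, implies_true]

theorem set_map_range {α : Type} (n m : Nat) (f : Nat → α) (x : α) :
    ((List.range n).map f).set m x = (List.range n).map (fun k => if k = m then x else f k) := by
  apply List.ext_getElem
  · simp
  · intro j hj1 hj2
    simp only [List.length_set, List.length_map, List.length_range] at hj1
    rw [List.getElem_set]
    simp only [List.getElem_map, List.getElem_range]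
    by_cases hmj : m = j
    · simp [hmj]
    · rw [if_neg hmj, if_neg (by omega : ¬ j = m)]

theorem bstep_on_map (n : Nat) (f : Nat → List Int) (m : Nat) (hm : m < n) :
    bstep (n : Int) ((List.range n).map f) (m : Int) =
      (List.range n).map (fun k => if k = m then rowB (n : Int) (f m) (m : Int) else f k) := by
  have hget : ∀ (g : Nat → List Int),
      PySem.List.pyGetD ((List.range n).map g) ((m : Nat) : Int) [] = g m := by
    intro g
    rw [PySem.List.pyGetD_natCast]
    rw [List.getD_eq_getElem _ _ (by simp [hm])]
    simp
  unfold bstep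
  simp only [PySem.List.pySetD_natCast]
  rw [hget f, set_map_range, hget, set_map_range]
  simp only [↓reduceIte]
  apply List.map_congr_left
  intro k _
  by_cases hk : k = m
  · subst hk; simp [rowB]
  · simp [hk]

theorem fold_inv (n : Nat) (f : Nat → List Int) (m : Nat) (hm : m ≤ n) :
    List.foldl (bstep (n : Int)) ((List.range n).map f)
        ((List.range m).map (fun (k : Nat) => (k : Int))) =
      (List.range n).map (fun k => if k < m then rowB (n : Int) (f k) (k : Int) else f k) := by
  induction m with
  | zero => simp
  | succ m ih =>
    rw [List.range_succ, List.map_append, List.foldl_append, ih (by omega)]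
    simp only [List.map_cons, List.map_nil, List.foldl_cons, List.foldl_nil]
    rw [bstep_on_map n _ m (by omega)]
    apply List.map_congr_left
    intro k _
    by_cases hk : k = m
    · subst hk; simp
    · have h1 : (k < m + 1) = (k < m) := by
        apply propext; constructor <;> intro <;> omega
      simp [hk, h1]

theorem A_char (n : Nat) :
    generate_cycle (n : Int) =
      (List.range n).map (fun (i : Nat) => (List.range n).map (fun (j : Nat) =>
        if |(i : Int) - (j : Int)| = 1 ∨ |(i : Int) - (j : Int)| = (n : Int) - 1 then (1 : Int) else 0)) := by
  unfold generate_cycle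
  rw [PySem.List.pyRange_zero_natCast, PySem.List.foldl_append_singleton_eq_map, List.nil_append,
    List.map_map]
  apply List.map_congr_left
  intro i _
  simp only [Function.comp]
  rw [PySem.List.foldl_append_singleton_eq_map, List.nil_append, List.map_map]
  rfl

theorem B_char (n : Nat) :
    generate_cycle_alt (n : Int) =
      (List.range n).map (fun (k : Nat) => rowB (n : Int) (List.replicate n (0 : Int)) (k : Int)) := by
  rw [alt_eq_foldl, PySem.List.pyRange_zero_natCast, List.map_map]
  have hinit : (List.range n).map ((fun _ => List.replicate ((n : Int)).toNat (0 : Int)) ∘ fun (k : Nat) => (k : Int)) =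
      (List.range n).map (fun _ => List.replicate n (0 : Int)) := by
    apply List.map_congr_left; intro k _; simp [Function.comp]
  rw [hinit, fold_inv n _ n (le_refl n)]
  apply List.map_congr_left
  intro k hk
  rw [List.mem_range] at hk
  simp [hk]

-- the arithmetic core: for 0 ≤ i, j < n the distance condition names exactly the two neighbour columns
theorem row_eq (n i : Nat) (hn : 0 < n) (hi : i < n) :
    (List.range n).map (fun (j : Nat) =>
        if |(i : Int) - (j : Int)| = 1 ∨ |(i : Int) - (j : Int)| = (n : Int) - 1 then (1 : Int) else 0) =
      rowB (n : Int) (List.replicate n (0 : Int)) (i : Int) := by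
  have hnpos : (0 : Int) < (n : Int) := by exact_mod_cast hn
  set k1 : Int := PySem.Int.mod ((i : Int) + 1) (n : Int) with hk1def
  set k2 : Int := PySem.Int.mod ((i : Int) - 1) (n : Int) with hk2def
  have hk1nn : 0 ≤ k1 := PySem.Int.mod_nonneg _ hnpos
  have hk1lt : k1 < n := PySem.Int.mod_lt _ hnpos
  have hk2nn : 0 ≤ k2 := PySem.Int.mod_nonneg _ hnpos
  have hk2lt : k2 < n := PySem.Int.mod_lt _ hnpos
  have h1 : (k1 = (i : Int) + 1 ∧ (i : Int) + 1 < n) ∨ (k1 = 0 ∧ (i : Int) + 1 = n) := by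
    rw [hk1def, PySem.Int.mod_eq_emod_of_pos hnpos]
    by_cases hc : (i : Int) + 1 < n
    · left; exact ⟨Int.emod_eq_of_lt (by omega) hc, hc⟩
    · right
      have he : (i : Int) + 1 = n := by omega
      rw [he, Int.emod_self]
      exact ⟨rfl, rfl⟩
  have h2 : (k2 = (i : Int) - 1 ∧ 0 < (i : Int)) ∨ (k2 = (n : Int) - 1 ∧ (i : Int) = 0) := by
    rw [hk2def, PySem.Int.mod_eq_emod_of_pos hnpos]
    by_cases hc : 0 < (i : Int)
    · left; exact ⟨Int.emod_eq_of_lt (by omega) (by omega), hc⟩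
    · right
      have hz : (i : Int) = 0 := by omega
      rw [hz]
      have hm : ((0 : Int) - 1) % n = ((n : Int) - 1) % n := by
        rw [show ((0 : Int) - 1) = ((n : Int) - 1) + (n : Int) * (-1) by ring, Int.add_mul_emod_self_left]
      rw [hm, Int.emod_eq_of_lt (by omega) (by omega)]
      exact ⟨rfl, rfl⟩
  unfold rowB
  rw [← hk1def, ← hk2def, PySem.List.pySetD_of_nonneg _ _ hk1nn, PySem.List.pySetD_of_nonneg _ _ hk2nn]
  apply List.ext_getElem
  · simp
  · intro j hj1 hj2
    simp only [List.length_map, List.length_range] at hj1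
    simp only [List.getElem_map, List.getElem_range]
    rw [List.getElem_set, List.getElem_set]
    simp only [List.getElem_replicate]
    rw [Int.abs_eq_natAbs]
    split_ifs <;> first
      | rfl
      | (exfalso; rcases h1 with ⟨e1, c1⟩ | ⟨e1, c1⟩ <;> rcases h2 with ⟨e2, c2⟩ | ⟨e2, c2⟩ <;> omega)

-- ===== VERDICT (by name: the statement is the Claim_ definition above) =====
theorem generate_cycle_spec : Claim_equal_generate_cycle := by
  intro size _
  unfold Spec_generate_cycle
  by_cases hpos : 0 < size
  · obtain ⟨n, rfl⟩ : ∃ n : Nat, size = (n : Int) := ⟨size.toNat, (Int.toNat_of_nonneg (by omega)).symm⟩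
    have hn : 0 < n := by exact_mod_cast hpos
    rw [A_char, B_char]
    apply List.map_congr_left
    intro i hi
    rw [List.mem_range] at hi
    exact row_eq n i hn hi
  · unfold generate_cycle
    rw [alt_eq_foldl, pyRange_nonpos _ (by omega)]
    rfl
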